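/-
  THE SEGMENTS OF `DGifGetScreenDesc` (dgif_lib.c:248-310; 176 instructions at 108080H; a PROTECTED frame: `Buf[3]`): the assertions
  at its cut points, the segment claims, and the COMPOSITION (segments ⇒ `DGifGetScreenDesc.spec`), proved here.
  The form: Gif/Spec/ReaderSegs.lean (`DGifGetWord`). Contract: Gif/Spec/Desc.lean.

  THE CUTS (every address is a label `Gif.L.DGifGetScreenDesc.at_<hex>`, design/cuts/DGifGetScreenDesc.txt):

      unit   from      to                         what it walks
      P      108080H   1080C6H                    six pushes, `sub rsp, 72`, `rbx = gif`, the frame's header, the shadow index in `rbp`,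
                                                  the two poison stores                                          (15 instructions)
      1      1080C6H   10813BH | 1080F7H          l.252-263: `Private`, `FileState` (two checked loads; `IS_READABLE` holds by PR3: the
                                                  arm 1080E4H … 1080F0H is never entered), DGifGetWord ×2         (20 instructions)
      2      10813BH   108152H | 1080F7H          l.266-270: InternalRead(Buf, 3); the short-read arm: `Error`, GifFreeMapObject(NULL),
                                                  `SColorMap = NULL`                                               (19 instructions)
      3      108152H   108211H | 1080F7H          l.272-277, 301, 309: the three checked stores of the flag bytes, `SortFlag` in `r14`,
                                                  `BitsPerPixel` in `r12`; no global map: `SColorMap = NULL`, GIF_OK (29 instructions)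
      4      108211H   108253H | 1080F7H          l.280-288: GifMakeMapObject(1 << BitsPerPixel, NULL), the store of `SColorMap`
                                                  (THE ADOPTION), NULL: `Error`; the store of `SortFlag` into the map, `i = 0`
                                                                                                                   (19 instructions)
      5      108253H   108284H | 1080F7H          THE LOOP HEAD l.288: `i < ColorCount`? no: GIF_OK; InternalRead(Buf, 3); the short-read
                                                  arm: GifFreeMapObject(SColorMap), `SColorMap = NULL`, `Error`     (26 instructions)
      6      108284H   108253H                    l.296-298, 288: the three checked byte stores `Colors[i].Red / Green / Blue`, `i++`
                                                                                                                   (34 instructions)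
      E      1080F7H   ret                        the store that clears the frame's shadow, `eax = r12d`, `add rsp, 72`, six pops, `ret`
                                                                                                                   (10 instructions)

  THE GHOSTS THAT CHANGE. Up to GifMakeMapObject the heap is the entry's `H` and the forest the entry's `F` (`F.scm = none`: the
  contract's pre). Segment 4 ends with A NEW heap `Hc` (`H` after the allocations of GifMakeMapObject) and the forest
  `withMap F mp` (= `F` with `scm := some mp`): the loop's assertions `Head` / `InLoop` have `Hc` and `mp` as parameters. The
  short-read arm of the loop frees the two objects of the map and stores NULL INSIDE segment 5: no pointer dangles at any cut. `Done`
  (before the epilogue) is stated for A heap `Hc` and A forest `Fc`: what the contract's post (`Back2`) says.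

  THE LOOP. Its head 108253H is a cut; the measure is `ColorCount − i`, carried as the ghost number `m` with
  `i + m = mp.count` (`i` = `r13`, zero-extended). Segment 5 goes from `Head m` to `InLoop m` (then `1 ≤ m`) or to `Done`; segment 6
  from `InLoop m` to `Head m'` for an `m' < m`. The composition is a strong induction on `m`.
-/
import Gif.Spec.Desc
import Gif.LabelsAt
namespace Gif.Spec
open X86 X86.User Asan ProgX.Base ProgX.Base.Spec

namespace DGifGetScreenDesc

/-- The active frames inside the body: the function's own protected frame (`base = RA − 120`), innermost. -/
abbrev framesIn (frames : List (Nat × FrameLayout)) (e : State) : List (Nat × FrameLayout) :=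
  ((e.reg .rsp).toNat - 120, Gif.Frames.DGifGetScreenDesc) :: frames

/-- The forest after the adoption of the screen's colour map `mp` (l.280): `F` with `scm := some mp`. -/
abbrev withMap (F : Forest) (mp : Map) : Forest := { F with scm := some mp }

/-- **WHAT EVERY CUT OF THE BODY SHARES** (nothing of it mentions the heap or the forest): the state `v` stands at the address `cut`,
inside the call that was entered at the state `e` (return address `ret`) with the function's precondition. The prologue is done:
six registers saved (`r15 r14 r13 r12 rbp rbx` in push order), `rsp = RA − 120`, `rbx = gif` (never changed afterwards), `rbp` = the
shadow index of the frame (`(RA − 120) >> 3`: the epilogue's store addresses `[rbp + C00000H]`); nothing was written but the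
function's stack, the frame's 8 shadow bytes and the contract's windows (the heap's region, its shadow, the cursor); the reader did
not go back. The frame's object `Buf[3]` is at `rsp + 32 = RA − 88`. No callee-saved register is left untouched: all six are pushed. -/
structure Core (cut : Word) (H : Heap) (rest : List Obj) (frames : List (Nat × FrameLayout)) (F : Forest) (R : Rd) (u₀ e : State)
    (ret : Word) (v : State) : Prop where
  /-- the function was entered at `e` … -/
  entry : AtEntry (conv u₀) Gif.L.DGifGetScreenDesc.entry (DGifGetScreenDesc.spec H rest frames F R).frame ret e
  /-- … with its precondition (`Env H rest frames F R e`, `rdi = F.gif`, `F.scm = none`) -/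
  pre : (DGifGetScreenDesc.spec H rest frames F R).pre e
  rip : v.rip = cut
  /-- six pushes and `sub rsp, 72` below the return address -/
  rsp : v.reg .rsp = e.reg .rsp - 120
  /-- `mov rbx, rdi` (10808EH): gif -/
  rbx : v.reg .rbx = e.reg .rdi
  /-- `mov rbp, rsp ; shr rbp, 3` (108091H, 1080AEH): the shadow index of the frame -/
  rbp : v.reg .rbp = (e.reg .rsp - 120) >>> 3
  /-- the saved registers, in push order -/
  slot_r15 : v.mem.readLE (e.reg .rsp - 8) 8 = (e.reg .r15).toNat
  slot_r14 : v.mem.readLE (e.reg .rsp - 16) 8 = (e.reg .r14).toNat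
  slot_r13 : v.mem.readLE (e.reg .rsp - 24) 8 = (e.reg .r13).toNat
  slot_r12 : v.mem.readLE (e.reg .rsp - 32) 8 = (e.reg .r12).toNat
  slot_rbp : v.mem.readLE (e.reg .rsp - 40) 8 = (e.reg .rbp).toNat
  slot_rbx : v.mem.readLE (e.reg .rsp - 48) 8 = (e.reg .rbx).toNat
  /-- the return address is still in its slot (`ret` at 108113H pops it): no store of the body reaches `[RA, RA + 8)` — the stack
  windows end at `RA`, the heap's region and the shadow begin at 800000H (above the stack), the cursor is a stack object of a
  caller's frame (at or above `RA + 8`) -/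
  slot_ra : UInt64.ofNat (v.mem.readLE (e.reg .rsp) 8) = ret
  /-- the reader did not go back -/
  rem : rem R v.mem ≤ rem R e.mem
  /-- the footprint so far: the function's stack (`frame = 400`), the shadow of the own frame (`[RA − 120, RA − 56)`), the
  contract's three windows -/
  same : Mem.SameExcept
    [⟨(e.reg .rsp).toNat - 400, (e.reg .rsp).toNat⟩,
     shadowSpan ((e.reg .rsp).toNat - 120) ((e.reg .rsp).toNat - 56),
     ⟨0x800000, 0x1000020⟩,
     ⟨R.cur, R.cur + 8⟩] e.mem v.mem
  code : (conv u₀).code.In v.mem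
  abi : (conv u₀).inv v

/-- **IN THE BODY BEFORE THE ALLOCATION** (cuts 1080C6H, 10813BH, 108152H, 108211H): `Core`, and the heap and the forest are the
entry's: the heap's invariant for `H` with the OWN frame pushed, the state invariant for `F` (whose `scm` is `none`: `core.pre`).
A callee's `Env H rest (framesIn frames e) F R s` is made of `inv` (lowered to the callee's `rsp + 8`), `core.pre`'s `HeapPre`
(base, limit, text) and `Ctx` (with `Ctx.push` for the own frame), and `ok`. -/
structure Body (cut : Word) (H : Heap) (rest : List Obj) (frames : List (Nat × FrameLayout)) (F : Forest) (R : Rd) (u₀ e : State)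
    (ret : Word) (v : State) : Prop where
  core : Core cut H rest frames F R u₀ e ret v
  /-- the heap's invariant, the own frame active, the clean stack ending at the present stack pointer -/
  inv : HeapInv H rest (framesIn frames e) ((e.reg .rsp).toNat - 120) v.mem
  /-- the state invariant, for the entry's heap and forest -/
  ok : GifOK H F R v.mem

/-- **AFTER THE PROLOGUE** (1080C6H): `Body`, and `rdi` still holds gif (the next instruction is `lea rdi, [rdi + 0x70]`). -/
structure Start (H : Heap) (rest : List Obj) (frames : List (Nat × FrameLayout)) (F : Forest) (R : Rd) (u₀ e : State)
    (ret : Word) (v : State) : Prop where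
  body : Body Gif.L.DGifGetScreenDesc.at_1080c6 H rest frames F R u₀ e ret v
  rdi : v.reg .rdi = e.reg .rdi

/-- **BEFORE `GifMakeMapObject(1 << BitsPerPixel, NULL)`** (108211H, l.280): `Body`, and `r12` holds `BitsPerPixel =
(Buf[0] & 7) + 1` (zero-extended: `mov r12d, r13d ; and r12d, 7 ; add r12d, 1`), between 1 and 8: `1 << BitsPerPixel ≤ 256` is what
GifMakeMapObject's pre asks. `r14b` holds `SortFlag` (any value: it is only stored, at 108248H). -/
structure AtMake (H : Heap) (rest : List Obj) (frames : List (Nat × FrameLayout)) (F : Forest) (R : Rd) (u₀ e : State)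
    (ret : Word) (v : State) : Prop where
  body : Body Gif.L.DGifGetScreenDesc.at_108211 H rest frames F R u₀ e ret v
  /-- `BitsPerPixel` ∈ [1, 8] -/
  bpp_lo : 1 ≤ (v.reg .r12).toNat
  bpp_hi : (v.reg .r12).toNat ≤ 8

/-- **IN THE COLOUR LOOP** (l.288-299; cuts 108253H = the head, 108284H = after the successful read): THE LOOP INVARIANT. The map is
ALREADY ADOPTED: the heap is `Hc` (at the place of `H`), the forest is `withMap F mp`, the state invariant holds for them — so
`gif.SColorMap = mp.obj`, `ColorCount = mp.count` (1 … 256), `Colors = mp.colors`, the two objects `(mp.obj, 24)` and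
`(mp.colors, 3 · mp.count)` are owned (the colour array is a DATA object: a store into it is `Loose.data`). `r13` holds `i`
(zero-extended: `mov r13d, 0`, `add r13d, 1`), and `i + m = mp.count` for THE MEASURE `m` (so `i ≤ ColorCount`). `r12`, `r14`, `r15`
are dead at both cuts (reloaded from gif). -/
structure Head (cut : Word) (H : Heap) (rest : List Obj) (frames : List (Nat × FrameLayout)) (F : Forest) (R : Rd) (Hc : Heap)
    (mp : Map) (m : Nat) (u₀ e : State) (ret : Word) (v : State) : Prop where
  core : Core cut H rest frames F R u₀ e ret v
  /-- the present heap is at the place of the entry's -/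
  region : SameRegion H Hc
  /-- the heap's invariant for the present heap, the own frame active -/
  inv : HeapInv Hc rest (framesIn frames e) ((e.reg .rsp).toNat - 120) v.mem
  /-- the state invariant for the present heap and the forest WITH the map -/
  ok : GifOK Hc (withMap F mp) R v.mem
  /-- `i + m = ColorCount` -/
  idx : (v.reg .r13).toNat + m = mp.count

/-- **AFTER THE SUCCESSFUL READ OF ONE COLOUR** (108284H): the invariant, and `i < ColorCount` (`1 ≤ m`): `Colors[i]` is an element
of the array (`3 · i + 3 ≤ 3 · mp.count`). The three bytes are in `Buf` (`[rsp + 32, rsp + 35)`: their values are not needed). -/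
structure InLoop (H : Heap) (rest : List Obj) (frames : List (Nat × FrameLayout)) (F : Forest) (R : Rd) (Hc : Heap)
    (mp : Map) (m : Nat) (u₀ e : State) (ret : Word) (v : State) : Prop where
  head : Head Gif.L.DGifGetScreenDesc.at_108284 H rest frames F R Hc mp m u₀ e ret v
  lt : 1 ≤ m

/-- **BEFORE THE EPILOGUE** (1080F7H): `Core`; the result is in `r12` (1 or 0, zero-extended: `mov r12d, imm32`, or `r12 = rax = 0`
on the NULL arm of l.281); and the contract's postcondition stated of the present memory, for the heap `Hc` and the forest `Fc`:
`Hc` is at the place of `H`, `Fc` differs from `F` in `scm` only, the heap's invariant (own frame still active) and the state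
invariant hold, and GIF_ERROR leaves `Fc.scm = none`. (The epilogue clears 8 shadow bytes and pops: `HeapInv.epilogue_ra`,
`GifOK.storesMem`.) -/
structure Done (H : Heap) (rest : List Obj) (frames : List (Nat × FrameLayout)) (F : Forest) (R : Rd) (Hc : Heap) (Fc : Forest)
    (u₀ e : State) (ret : Word) (v : State) : Prop where
  core : Core Gif.L.DGifGetScreenDesc.at_1080f7 H rest frames F R u₀ e ret v
  /-- the final heap is at the place of the entry's; the final forest differs from the entry's in `scm` only -/
  region : SameRegion H Hc
  sameBut : F.SameButScm Fc
  /-- the heap's invariant (own frame still active) and the state invariant, for the final heap and forest -/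
  inv : HeapInv Hc rest (framesIn frames e) ((e.reg .rsp).toNat - 120) v.mem
  ok : GifOK Hc Fc R v.mem
  /-- GIF_OK or GIF_ERROR -/
  res : (v.reg .r12).toNat = 1 ∨ (v.reg .r12).toNat = 0
  /-- GIF_ERROR: no colour map is owned -/
  err : (v.reg .r12).toNat = 0 → Fc.scm = none

/-- **An exit to the epilogue**: `Done` for A heap and A forest. -/
def Exit (H : Heap) (rest : List Obj) (frames : List (Nat × FrameLayout)) (F : Forest) (R : Rd) (u₀ e : State) (ret : Word)
    (w : State) : Prop :=
  ∃ (Hc : Heap) (Fc : Forest), Done H rest frames F R Hc Fc u₀ e ret w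

/-- **Segment P** (the prologue, 108080H … 1080C6H, 15 instructions): six pushes, `sub rsp, 72`, `mov rbx, rdi`, the frame's three
header words, the shadow index in `rbp`, the two poison stores (`HeapInv.prologue_ra`, `GifOK.storesMem`). `rdi` is not touched. -/
def SegP (Lay : Layout) (μ : Microarch) (u₀ : State) : Prop :=
  ∀ (H : Heap) (rest : List Obj) (frames : List (Nat × FrameLayout)) (F : Forest) (R : Rd) (e : State) (ret : Word),
    AtEntry (conv u₀) Gif.L.DGifGetScreenDesc.entry (DGifGetScreenDesc.spec H rest frames F R).frame ret e →
    (DGifGetScreenDesc.spec H rest frames F R).pre e →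
    ReachVia Lay μ WayInv e (Start H rest frames F R u₀ e ret)

/-- **Segment 1** (1080C6H … 10813BH, l.252-263, 20 instructions): the checked load of `gif.Private`, the checked load of
`Private->FileState` (8 by `ok.shape.state`: `and eax, 8 ; jne` is taken, the NOT_READABLE arm 1080E4H … 1080F0H is not entered),
`DGifGetWord(gif, &gif->SWidth)`, `DGifGetWord(gif, &gif->SHeight)` (`rsi = gif`, `gif + 4`: inside `[gif, gif + 24)`). Either
fails: `r12d = 0`, to the epilogue with the entry's heap and forest (`F.scm = none`). -/
def Seg1 (Lay : Layout) (μ : Microarch) (u₀ : State) : Prop :=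
  ∀ (H : Heap) (rest : List Obj) (frames : List (Nat × FrameLayout)) (F : Forest) (R : Rd) (e : State) (ret : Word) (v : State),
    Start H rest frames F R u₀ e ret v →
    ReachVia Lay μ WayInv v (fun w =>
      Body Gif.L.DGifGetScreenDesc.at_10813b H rest frames F R u₀ e ret w ∨
      Exit H rest frames F R u₀ e ret w)

/-- **Segment 2** (10813BH … 108152H, l.266-270, 19 instructions): `InternalRead(gif, Buf, 3)` into the frame's object `Buf`
(`rsi = rsp + 32`; `BufOK`: a stack object of the own frame, below the cursor). 3 bytes: on to 108152H. Fewer (1081D1H): the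
checked store of `gif.Error`, the checked load of `gif.SColorMap` — NULL by `ok.shape.scm` with `F.scm = none` —,
`GifFreeMapObject(NULL)` (its post: the same heap, no shadow byte written), the checked store `SColorMap = NULL` (`Shape.set_scm`
with `none`), `r12d = 0`, to the epilogue with the entry's heap and forest. -/
def Seg2 (Lay : Layout) (μ : Microarch) (u₀ : State) : Prop :=
  ∀ (H : Heap) (rest : List Obj) (frames : List (Nat × FrameLayout)) (F : Forest) (R : Rd) (e : State) (ret : Word) (v : State),
    Body Gif.L.DGifGetScreenDesc.at_10813b H rest frames F R u₀ e ret v →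
    ReachVia Lay μ WayInv v (fun w =>
      Body Gif.L.DGifGetScreenDesc.at_108152 H rest frames F R u₀ e ret w ∨
      Exit H rest frames F R u₀ e ret w)

/-- **Segment 3** (108152H … 108211H, l.272-277, 301, 309; 29 instructions, no contract call): `r13d = Buf[0]`; the checked stores of
`SColorResolution` (`gif + 8`), `SBackGroundColor` (`gif + 12`), `AspectByte` (`gif + 16`): scalar fields of gif (`Loose`);
`r14d = SortFlag`, `r12d = (Buf[0] & 7) + 1`. Bit 7 of `Buf[0]` set (`js`): on to 108211H. Clear (1081B5H): the checked store
`SColorMap = NULL` (`Shape.set_scm` with `none`), `r12d = 1`, to the epilogue with the entry's heap and forest. -/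
def Seg3 (Lay : Layout) (μ : Microarch) (u₀ : State) : Prop :=
  ∀ (H : Heap) (rest : List Obj) (frames : List (Nat × FrameLayout)) (F : Forest) (R : Rd) (e : State) (ret : Word) (v : State),
    Body Gif.L.DGifGetScreenDesc.at_108152 H rest frames F R u₀ e ret v →
    ReachVia Lay μ WayInv v (fun w =>
      AtMake H rest frames F R u₀ e ret w ∨
      Exit H rest frames F R u₀ e ret w)

/-- **Segment 4** (108211H … 108253H, l.280-288, 19 instructions): `edi = 1 << cl` with `cl = BitsPerPixel` ∈ [1, 8]: the count
2 … 256; `GifMakeMapObject(count, NULL)` (`MakeMapPost`: A heap `H'` with `H.Grew H'`); the checked store of `gif.SColorMap`.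
NULL (108315H): the field holds 0 as before, the checked store of `gif.Error`, `r12 = 0`: to the epilogue with the heap `H'` and the
entry's forest. Otherwise THE ADOPTION: the checked byte store of `SortFlag` at `map + 8` and `r13d = 0`, to the loop head with
`Hc = H'`, `mp = ⟨rax, colors, count⟩`, `m = count`. The two stores (`[gif + 24, gif + 32)` and the byte at `map + 8`) are ONE step
`Shape.set_scm` from the forest `F`: the second window lies in a live object the forest `F` does not own (`Loose.fresh`: its base
is at or above `H.next`); `MapAt (some mp)` from `MakeMapPost`'s two field values (`MapAt.intro`; the byte at `map + 8` is neither
field). `Owns Hc (withMap F mp).owned`: `Owns.cons_grew` for the colour array, `Owns.cons` for the map object (`colors ≠ rax`,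
`H.next ≤ rax`), `Forest.owned_scm` for the order. -/
def Seg4 (Lay : Layout) (μ : Microarch) (u₀ : State) : Prop :=
  ∀ (H : Heap) (rest : List Obj) (frames : List (Nat × FrameLayout)) (F : Forest) (R : Rd) (e : State) (ret : Word) (v : State),
    AtMake H rest frames F R u₀ e ret v →
    ReachVia Lay μ WayInv v (fun w =>
      (∃ (Hc : Heap) (mp : Map) (m : Nat),
        Head Gif.L.DGifGetScreenDesc.at_108253 H rest frames F R Hc mp m u₀ e ret w) ∨
      Exit H rest frames F R u₀ e ret w)

/-- **Segment 5** (THE LOOP HEAD 108253H … 108284H, l.288-294, 26 instructions): `r12 = gif.SColorMap`, the checked load of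
`ColorCount`, `cmp [r12], r13d ; jle`: `ColorCount ≤ i` (then `m = 0`): `r12d = 1` (10836AH), to the epilogue with the present
heap and the forest with the map. Otherwise (`1 ≤ m`) `InternalRead(gif, Buf, 3)`; 3 bytes: on to 108284H (same heap, same forest,
same `m`). Fewer (10832AH): the checked load of `gif.SColorMap`, `GifFreeMapObject(mp.obj)` (ghosts `mp.colors`, `3 · mp.count`:
both objects live and different by `ok.owns`; `Colors` by `ok.shape.scm`), the checked store `SColorMap = NULL` (`Shape.set_scm`
with `none`; `Owns.release` twice along `Forest.owned_scm`), the checked store of `gif.Error`, `r12d = 0`: to the epilogue with the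
heap `(Hc.release mp.colors).release mp.obj` and the forest `F` again (`scm = none`). -/
def Seg5 (Lay : Layout) (μ : Microarch) (u₀ : State) : Prop :=
  ∀ (H : Heap) (rest : List Obj) (frames : List (Nat × FrameLayout)) (F : Forest) (R : Rd) (Hc : Heap) (mp : Map) (m : Nat)
    (e : State) (ret : Word) (v : State),
    Head Gif.L.DGifGetScreenDesc.at_108253 H rest frames F R Hc mp m u₀ e ret v →
    ReachVia Lay μ WayInv v (fun w =>
      InLoop H rest frames F R Hc mp m u₀ e ret w ∨
      Exit H rest frames F R u₀ e ret w)

/-- **Segment 6** (108284H … 108253H, l.296-298 and `i++`, 34 instructions, no contract call): three times: the checked load of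
`gif.SColorMap`, the checked load of its `Colors`, the checked byte store at `Colors + 3 · i + k` (`k = 0, 1, 2`; `movsxd rax, r13d ;
lea r12, [rax + rax * 2]`; inside the colour array because `i < mp.count`; a DATA object: `Loose.data`, so the state invariant
holds again after each store and the next two loads read the same values); `add r13d, 1`; back to the head with the measure
`m − 1`. -/
def Seg6 (Lay : Layout) (μ : Microarch) (u₀ : State) : Prop :=
  ∀ (H : Heap) (rest : List Obj) (frames : List (Nat × FrameLayout)) (F : Forest) (R : Rd) (Hc : Heap) (mp : Map) (m : Nat)
    (e : State) (ret : Word) (v : State),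
    InLoop H rest frames F R Hc mp m u₀ e ret v →
    ReachVia Lay μ WayInv v (fun w =>
      ∃ m', m' < m ∧ Head Gif.L.DGifGetScreenDesc.at_108253 H rest frames F R Hc mp m' u₀ e ret w)

/-- **Segment E** (the epilogue, 1080F7H … `ret`, 10 instructions): the 8-byte store that clears the frame's shadow, `mov eax, r12d`,
`add rsp, 72`, six pops, `ret`. The contract's post from `Done`: `Back2` (`region`, `inv` through `HeapInv.epilogue_ra`, `ok`
through `GifOK.storesMem`, `core.rem`), `sameBut`, `IsBool` from `res`, the error clause from `err`. -/
def SegE (Lay : Layout) (μ : Microarch) (u₀ : State) : Prop :=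
  ∀ (H : Heap) (rest : List Obj) (frames : List (Nat × FrameLayout)) (F : Forest) (R : Rd) (Hc : Heap) (Fc : Forest)
    (e : State) (ret : Word) (v : State),
    Done H rest frames F R Hc Fc u₀ e ret v →
    ReachVia Lay μ WayInv v (Returned (conv u₀) (DGifGetScreenDesc.spec H rest frames F R) e ret)

/-- **The composition of `DGifGetScreenDesc`**: the eight segments chain into the function's contract; the colour loop by a strong
induction on its measure. -/
theorem compose {Lay : Layout} {μ : Microarch} {u₀ : State} (hP : SegP Lay μ u₀) (h1 : Seg1 Lay μ u₀) (h2 : Seg2 Lay μ u₀)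
    (h3 : Seg3 Lay μ u₀) (h4 : Seg4 Lay μ u₀) (h5 : Seg5 Lay μ u₀) (h6 : Seg6 Lay μ u₀) (hE : SegE Lay μ u₀) :
    ∀ (H : Heap) (rest : List Obj) (frames : List (Nat × FrameLayout)) (F : Forest) (R : Rd),
      Calls Lay μ WayInv (conv u₀) Gif.L.DGifGetScreenDesc.entry (DGifGetScreenDesc.spec H rest frames F R) := by
  intro H rest frames F R e ret he hp
  -- from any exit to the epilogue: segment E
  have tail : ∀ w, Exit H rest frames F R u₀ e ret w →
      ReachVia Lay μ WayInv w (Returned (conv u₀) (DGifGetScreenDesc.spec H rest frames F R) e ret) := by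
    intro w hw
    obtain ⟨Hc, Fc, hd⟩ := hw
    exact hE H rest frames F R Hc Fc e ret w hd
  -- from the loop head: by strong induction on the measure
  have loop : ∀ (m : Nat) (Hc : Heap) (mp : Map) (x : State),
      Head Gif.L.DGifGetScreenDesc.at_108253 H rest frames F R Hc mp m u₀ e ret x →
      ReachVia Lay μ WayInv x (Returned (conv u₀) (DGifGetScreenDesc.spec H rest frames F R) e ret) := by
    intro m
    induction m using Nat.strongRecOn with
    | _ m ih =>
      intro Hc mp x hx
      refine (h5 H rest frames F R Hc mp m e ret x hx).trans ?_
      intro y hy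
      rcases hy with hin | hdone
      · refine (h6 H rest frames F R Hc mp m e ret y hin).trans ?_
        intro z hz
        obtain ⟨m', hlt, hz'⟩ := hz
        exact ih m' hlt Hc mp z hz'
      · exact tail y hdone
  -- the straight part
  refine (hP H rest frames F R e ret he hp).trans ?_
  intro v1 hv1
  refine (h1 H rest frames F R e ret v1 hv1).trans ?_
  intro v2 hv2
  rcases hv2 with hb2 | hd2
  · refine (h2 H rest frames F R e ret v2 hb2).trans ?_
    intro v3 hv3
    rcases hv3 with hb3 | hd3
    · refine (h3 H rest frames F R e ret v3 hb3).trans ?_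
      intro v4 hv4
      rcases hv4 with hb4 | hd4
      · refine (h4 H rest frames F R e ret v4 hb4).trans ?_
        intro v5 hv5
        rcases hv5 with hhead | hd5
        · obtain ⟨Hc, mp, m, hh⟩ := hhead
          exact loop m Hc mp v5 hh
        · exact tail v5 hd5
      · exact tail v4 hd4
    · exact tail v3 hd3
  · exact tail v2 hd2

end DGifGetScreenDesc

end Gif.Spec
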